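-- pv_equiv track=rewrite | github.com/ragestack/Calc-JUID-Control-Number | CalcJUIDControlNumber.py | calcMod97
-- ===== SOURCE A (Python) =====
-- def calcMod97(code):
--     modulus = 97
--     maxS = 999999999
--     s = 0
--     for c in code:
--         if c.isdigit():
--             a = ord(c) - ord('0')
--         elif c.isupper():
--             a = ord(c) - ord('A') + 10
--         elif c.islower():
--             a = ord(c) - ord('a') + 10
--         else:
--             a = 0
--
--         if a >= 10:
--             s = s * 100 + a
--         else:
--             s = s * 10 + a
--
--         if s > maxS:
--             s = s % modulus
--
--     result = s % modulus
--     return result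
-- ===== SOURCE B (Python) =====
-- def calcMod97(code):
--     total = 0
--     weight = 1
--     for c in reversed(code):
--         if c.isalpha():
--             a = ord(c.lower()) - ord('a') + 10
--         elif c.isdigit():
--             a = ord(c) - ord('0')
--         else:
--             a = 0
--         total = (total + a * weight) % 97
--         weight = weight * (100 if a >= 10 else 10) % 97
--     return total
-- ===== Notes on version B (the rewrite author's own statement) =====
-- stated objective: alternative
-- what changed: Replaces A's forward big-integer accumulator with its overflow-triggered periodic mod-97 reduction by a right-to-left single pass that keeps two always-reduced mod-97 accumulators (running total and positional weight), folding each character's contribution in with modular arithmetic at every step.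
import Mathlib
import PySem

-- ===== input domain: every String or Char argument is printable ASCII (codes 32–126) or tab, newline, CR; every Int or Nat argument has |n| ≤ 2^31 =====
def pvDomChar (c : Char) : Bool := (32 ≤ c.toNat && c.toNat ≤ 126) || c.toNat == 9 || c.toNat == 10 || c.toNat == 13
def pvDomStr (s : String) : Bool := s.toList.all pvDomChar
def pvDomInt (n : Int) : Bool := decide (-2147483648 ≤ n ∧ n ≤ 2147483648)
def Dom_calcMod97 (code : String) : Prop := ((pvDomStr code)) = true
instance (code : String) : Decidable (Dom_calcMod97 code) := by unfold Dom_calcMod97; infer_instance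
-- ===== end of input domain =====

-- B replaces A's forward big-integer accumulator with periodic overflow reduction by a
-- right-to-left single pass keeping two mod-97 accumulators (running total and positional
-- weight); objective: alternative (same cost, structurally different; return value only).

-- ===== PORT A =====
-- per-character value: digit → 0–9, letter → 10–35, other → 0  (A's if/elif chain)
def calcCharValA (c : Char) : Int :=
  if PySem.Chars.isdigit c then (c.toNat : Int) - ('0'.toNat : Int)
  else if PySem.Chars.isupper c then (c.toNat : Int) - ('A'.toNat : Int) + 10
  else if PySem.Chars.islower c then (c.toNat : Int) - ('a'.toNat : Int) + 10
  else 0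

def calcMod97 (code : String) : Int :=
  let modulus : Int := 97
  let maxS : Int := 999999999
  let s := code.toList.foldl (fun s c =>
    let a := calcCharValA c
    let s := if a ≥ 10 then s * 100 + a else s * 10 + a
    if s > maxS then PySem.Int.mod s modulus else s) 0
  PySem.Int.mod s modulus

-- ===== PORT B =====
-- per-character value, B's decomposition: letter (via lower-casing) first, then digit
def calcCharValB (c : Char) : Int :=
  if PySem.Chars.isalpha c then ((PySem.Chars.lowerChar c).toNat : Int) - ('a'.toNat : Int) + 10
  else if PySem.Chars.isdigit c then (c.toNat : Int) - ('0'.toNat : Int)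
  else 0

def calcMod97_alt (code : String) : Int :=
  (code.toList.reverse.foldl (fun (tw : Int × Int) c =>
    let a := calcCharValB c
    (PySem.Int.mod (tw.1 + a * tw.2) 97,
     PySem.Int.mod (tw.2 * (if a ≥ 10 then 100 else 10)) 97)) (0, 1)).1

-- ===== PRECONDITION & SPEC =====
def Spec_calcMod97 (code : String) (out : Int) : Prop := out = calcMod97_alt code
instance (code : String) (out : Int) : Decidable (Spec_calcMod97 code out) := by unfold Spec_calcMod97; infer_instance

-- ===== CLAIM (what is proved, stated in full; the proofs are below) =====
def Claim_equal_calcMod97 : Prop := ∀ (code : String), Dom_calcMod97 code → Spec_calcMod97 code (calcMod97 code)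

-- ===== LEMMAS AND PROOFS =====

theorem char_le_iff (c d : Char) : (c ≤ d) ↔ c.toNat ≤ d.toNat := by
  rw [Char.le_def]; exact UInt32.le_iff_toNat_le

theorem ofNat_toNat_small (n : Nat) (h : n < 55296) : (Char.ofNat n).toNat = n := by
  unfold Char.ofNat
  split
  · rfl
  · next hh => exact absurd (Or.inl h) hh

-- the two per-character maps agree on every Char
theorem charVal_eq (c : Char) : calcCharValB c = calcCharValA c := by
  unfold calcCharValA calcCharValB
  unfold PySem.Chars.isalpha PySem.Chars.lowerChar PySem.Chars.isdigit PySem.Chars.isupper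
    PySem.Chars.islower
  have h0 : '0'.toNat = 48 := rfl
  have h9 : '9'.toNat = 57 := rfl
  have hA : 'A'.toNat = 65 := rfl
  have hZ : 'Z'.toNat = 90 := rfl
  have ha : 'a'.toNat = 97 := rfl
  have hz : 'z'.toNat = 122 := rfl
  simp only [char_le_iff, h0, h9, hA, hZ, ha, hz, Bool.or_eq_true, Bool.and_eq_true,
    decide_eq_true_eq, apply_ite Char.toNat]
  split_ifs <;>
    first
      | omega
      | (rw [ofNat_toNat_small _ (by omega)]; omega)

-- positional weight and value of a character list (most significant first)
def pWeight : List Char → Int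
  | [] => 1
  | c :: ds => (if calcCharValA c ≥ 10 then 100 else 10) * pWeight ds

def pValue : List Char → Int
  | [] => 0
  | c :: ds => calcCharValA c * pWeight ds + pValue ds

-- A's loop from any start s congruent mod 97 to s' computes s' * pWeight + pValue, mod 97
theorem foldA_mod (ds : List Char) : ∀ s s' : Int, s % 97 = s' % 97 →
    (ds.foldl (fun s c =>
      let a := calcCharValA c
      let s := if a ≥ 10 then s * 100 + a else s * 10 + a
      if s > 999999999 then PySem.Int.mod s 97 else s) s) % 97
    = (s' * pWeight ds + pValue ds) % 97 := by
  induction ds with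
  | nil => intro s s' h; simpa [pWeight, pValue] using h
  | cons c ds ih =>
    intro s s' h
    simp only [List.foldl_cons]
    have hstep : ∀ t : Int, (if t > 999999999 then PySem.Int.mod t 97 else t) % 97 = t % 97 := by
      intro t
      split
      · rw [PySem.Int.mod_eq_emod_of_pos (by norm_num)]
        exact Int.emod_emod_of_dvd t dvd_rfl
      · rfl
    have hmul : ∀ b : Int, (s * b + calcCharValA c) % 97 = (s' * b + calcCharValA c) % 97 :=
      fun b => (Int.ModEq.mul_right b (show Int.ModEq 97 s s' from h)).add_right _
    by_cases h10 : calcCharValA c ≥ 10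
    · rw [ih _ (s' * 100 + calcCharValA c) (by simp only [h10, if_true]; rw [hstep]; exact hmul 100)]
      simp only [pWeight, pValue, h10, if_true]
      congr 1; ring
    · rw [ih _ (s' * 10 + calcCharValA c) (by simp only [h10, if_false]; rw [hstep]; exact hmul 10)]
      simp only [pWeight, pValue, h10, if_false]
      congr 1; ring

-- B's reversed loop computes (pValue mod 97, pWeight mod 97)
theorem foldB_inv (ds : List Char) :
    ds.reverse.foldl (fun (tw : Int × Int) c =>
      let a := calcCharValB c
      (PySem.Int.mod (tw.1 + a * tw.2) 97,
       PySem.Int.mod (tw.2 * (if a ≥ 10 then 100 else 10)) 97)) (0, 1)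
    = (pValue ds % 97, pWeight ds % 97) := by
  induction ds with
  | nil => simp [pValue, pWeight]
  | cons c ds ih =>
    simp only [List.reverse_cons, List.foldl_append, ih, List.foldl_cons, List.foldl_nil]
    rw [charVal_eq]
    rw [PySem.Int.mod_eq_emod_of_pos (by norm_num), PySem.Int.mod_eq_emod_of_pos (by norm_num)]
    simp only [pValue, pWeight, Prod.mk.injEq]
    have h1 : Int.ModEq 97 (pValue ds % 97) (pValue ds) := Int.emod_emod_of_dvd _ dvd_rfl
    have h2 : Int.ModEq 97 (pWeight ds % 97) (pWeight ds) := Int.emod_emod_of_dvd _ dvd_rfl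
    constructor
    · calc (pValue ds % 97 + calcCharValA c * (pWeight ds % 97)) % 97
          = (pValue ds + calcCharValA c * pWeight ds) % 97 := h1.add (h2.mul_left _)
        _ = (calcCharValA c * pWeight ds + pValue ds) % 97 := by congr 1; ring
    · calc (pWeight ds % 97 * if calcCharValA c ≥ 10 then 100 else 10) % 97
          = (pWeight ds * if calcCharValA c ≥ 10 then 100 else 10) % 97 := h2.mul_right _
        _ = ((if calcCharValA c ≥ 10 then 100 else 10) * pWeight ds) % 97 := by congr 1; ring

-- ===== VERDICT (by name: the statement is the Claim_ definition above) =====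
theorem calcMod97_spec : Claim_equal_calcMod97 := by
  intro code _
  unfold Spec_calcMod97 calcMod97 calcMod97_alt
  rw [foldB_inv, PySem.Int.mod_eq_emod_of_pos (by norm_num)]
  simpa using foldA_mod code.toList 0 0 rfl
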